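-- pv_equiv track=rewrite | github.com/codemacs/foobar | bunny_prisoner_locating_solution.py | answer
-- ===== SOURCE A (Python) =====
-- def answer(x_num, y_num):
--     step = x_num
--     ans = 0
--     while(x_num > 0):
--         ans += x_num
--         x_num = x_num -1
--     if (y_num > 1):
--         for i in range(0,y_num - 1):
--             ans = ans + i + step
--     return ans
-- ===== SOURCE B (Python) =====
-- def answer(x_num, y_num):
--     ans = x_num * (x_num + 1) // 2 if x_num > 0 else 0
--     if y_num > 1:
--         m = y_num - 1
--         ans = ans + m * x_num + m * (m - 1) // 2
--     return ans
-- ===== Notes on version B (the rewrite author's own statement) =====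
-- stated objective: faster
-- what changed: Replaces the O(x) countdown while-loop and the O(y) for-loop with two closed-form triangular-number formulas n(n+1)//2.
import Mathlib
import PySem

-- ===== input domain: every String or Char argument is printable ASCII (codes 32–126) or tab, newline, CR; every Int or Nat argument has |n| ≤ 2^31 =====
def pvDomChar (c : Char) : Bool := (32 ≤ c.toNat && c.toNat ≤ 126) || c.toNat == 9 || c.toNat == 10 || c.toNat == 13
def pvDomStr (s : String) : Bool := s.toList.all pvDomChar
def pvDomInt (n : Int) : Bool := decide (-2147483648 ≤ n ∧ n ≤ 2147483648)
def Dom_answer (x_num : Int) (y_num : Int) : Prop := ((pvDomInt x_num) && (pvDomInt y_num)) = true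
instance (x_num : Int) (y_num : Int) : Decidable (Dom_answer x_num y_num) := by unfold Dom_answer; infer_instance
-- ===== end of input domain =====

-- B replaces A's two loops by closed-form triangular-number formulas (objective: faster, O(1) vs O(x+y)).

-- ===== PORT A =====
-- the 'while x_num > 0: ans += x_num; x_num -= 1' loop of A
def answerWhile (x_num : Int) (ans : Int) : Int :=
  if _h : x_num > 0 then answerWhile (x_num - 1) (ans + x_num) else ans
termination_by x_num.toNat
decreasing_by omega

def answer (x_num : Int) (y_num : Int) : Int :=
  let step := x_num
  let ans := answerWhile x_num 0
  if y_num > 1 then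
    (PySem.List.pyRange 0 (y_num - 1) 1).foldl (fun ans i => ans + i + step) ans
  else ans

-- ===== PORT B =====
def answer_alt (x_num : Int) (y_num : Int) : Int :=
  let ans := if x_num > 0 then PySem.Int.floordiv (x_num * (x_num + 1)) 2 else 0
  if y_num > 1 then
    let m := y_num - 1
    ans + m * x_num + PySem.Int.floordiv (m * (m - 1)) 2
  else ans

-- ===== PRECONDITION & SPEC =====
def Spec_answer (x_num : Int) (y_num : Int) (out : Int) : Prop := out = answer_alt x_num y_num
instance (x_num : Int) (y_num : Int) (out : Int) : Decidable (Spec_answer x_num y_num out) := by unfold Spec_answer; infer_instance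

-- ===== CLAIM (what is proved, stated in full; the proofs are below) =====
def Claim_equal_answer : Prop := ∀ (x_num : Int) (y_num : Int), Dom_answer x_num y_num → Spec_answer x_num y_num (answer x_num y_num)

-- ===== LEMMAS AND PROOFS =====

theorem answerWhile_eq (x a : Int) :
    answerWhile x a = a + (if x > 0 then x * (x + 1) / 2 else 0) := by
  induction x, a using answerWhile.induct with
  | case1 x a hx ih =>
    rw [answerWhile, dif_pos hx, ih, if_pos hx]
    by_cases h1 : x - 1 > 0
    · rw [if_pos h1]
      have hx1 : x * (x + 1) = (x - 1) * x + x * 2 := by ring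
      rw [hx1, Int.add_mul_ediv_right _ _ (by norm_num)]
      have : (x - 1) * x = (x - 1) * ((x - 1) + 1) := by ring
      rw [this]; ring
    · have hx1 : x = 1 := by omega
      subst hx1; rw [if_neg h1]; norm_num
  | case2 x a hx =>
    rw [answerWhile, dif_neg hx, if_neg hx]; ring

theorem forLoop_eq (step a : Int) (n : Nat) :
    (PySem.List.pyRange 0 (n : Int) 1).foldl (fun ans i => ans + i + step) a
      = a + (n : Int) * step + (n : Int) * ((n : Int) - 1) / 2 := by
  induction n generalizing a with
  | zero => simp [PySem.List.pyRange_one_eq_nil]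
  | succ k ih =>
    have hsucc : ((k + 1 : Nat) : Int) = (k : Int) + 1 := by push_cast; ring
    rw [hsucc, PySem.List.pyRange_one_succ_right (by positivity), List.foldl_append, ih]
    simp only [List.foldl_cons, List.foldl_nil]
    have h1 : ((k : Int) + 1) * ((k : Int) + 1 - 1) = (k : Int) * ((k : Int) - 1) + k * 2 := by
      ring
    rw [h1, Int.add_mul_ediv_right _ _ (by norm_num)]
    ring

-- ===== VERDICT (by name: the statement is the Claim_ definition above) =====
theorem answer_spec : Claim_equal_answer := by
  intro x y _
  show answer x y = answer_alt x y
  unfold answer answer_alt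
  simp only []
  rw [answerWhile_eq]
  by_cases hy : y > 1
  · rw [if_pos hy, if_pos hy]
    have hm : y - 1 = ((y - 1).toNat : Int) := by omega
    rw [hm, forLoop_eq]
    rw [PySem.Int.floordiv_eq_ediv_of_pos (by norm_num),
        PySem.Int.floordiv_eq_ediv_of_pos (by norm_num)]
    have : (((y - 1).toNat : Int)) * (((y - 1).toNat : Int) - 1) = (y - 1) * (y - 1 - 1) := by
      rw [← hm]
    rw [this, ← hm]
    by_cases hx : x > 0
    · ring
    · ring
  · rw [if_neg hy, if_neg hy]
    by_cases hx : x > 0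
    · rw [if_pos hx, if_pos hx,
        PySem.Int.floordiv_eq_ediv_of_pos (by norm_num)]; ring
    · rw [if_neg hx, if_neg hx]; ring
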